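-- pv_equiv track=rewrite | github.com/Ename45/SemicolonExam_Java_and_Python | pythonExam/PrintTwoLettersInLine.py | twoLettersInEachLine
-- ===== SOURCE A (Python) =====
-- def twoLettersInEachLine(word):
--     count = 1
--     result = ""
--     for i in range(len(word)):
--         result += word[i]
--         if (count % 2 == 0):
--             result += '\n'
--         count += 1
--     return result
-- ===== SOURCE B (Python) =====
-- def twoLettersInEachLine(word):
--     chunks = [word[i:i + 2] for i in range(0, len(word), 2)]
--     return ''.join(c + '\n' if len(c) == 2 else c for c in chunks)
-- ===== Notes on version B (the rewrite author's own statement) =====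
-- stated objective: simpler
-- what changed: Replaces the per-character loop with a modulo counter and repeated string concatenation by slicing the word into 2-character chunks and joining them, appending a newline after each complete chunk.
import Mathlib
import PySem

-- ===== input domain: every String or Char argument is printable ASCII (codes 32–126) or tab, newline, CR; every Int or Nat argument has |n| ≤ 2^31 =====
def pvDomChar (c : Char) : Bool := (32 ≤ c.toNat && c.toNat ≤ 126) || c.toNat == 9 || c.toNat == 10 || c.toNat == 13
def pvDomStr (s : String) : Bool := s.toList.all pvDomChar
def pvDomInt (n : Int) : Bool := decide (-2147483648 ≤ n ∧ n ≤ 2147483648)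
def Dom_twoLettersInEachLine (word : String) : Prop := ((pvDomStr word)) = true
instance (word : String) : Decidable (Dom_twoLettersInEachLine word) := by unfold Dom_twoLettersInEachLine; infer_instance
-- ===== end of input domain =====

-- B replaces A's per-character loop with a modulo counter by slicing into 2-char chunks and joining (simpler).

-- ===== PORT A =====
-- the loop body of A: result += word[i]; if count % 2 == 0: result += '\n'; count += 1
def twoLettersInEachLine.body (cs : List Char) (st : Int × List Char) (i : Int) : Int × List Char :=
  let result := st.2 ++ [PySem.List.pyGetD cs i ' ']   -- word[i]; i ∈ range(len(word)) is always in range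
  let result := if PySem.Int.mod st.1 2 == 0 then result ++ ['\n'] else result
  (st.1 + 1, result)

def twoLettersInEachLine (word : String) : String :=
  String.ofList ((PySem.List.pyRange 0 (PySem.Str.len word) 1).foldl
    (twoLettersInEachLine.body word.toList) (1, [])).2

-- ===== PORT B =====
-- one chunk word[i:i+2], followed by '\n' exactly when it is a complete pair
def twoLettersInEachLine_alt.chunk (cs : List Char) (i : Int) : List Char :=
  let c := PySem.List.slice cs (some i) (some (i + 2))
  if c.length == 2 then c ++ ['\n'] else c

def twoLettersInEachLine_alt (word : String) : String :=
  String.ofList ((PySem.List.pyRange 0 (PySem.Str.len word) 2).map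
    (twoLettersInEachLine_alt.chunk word.toList)).flatten

-- ===== PRECONDITION & SPEC =====
def Spec_twoLettersInEachLine (word : String) (out : String) : Prop := out = twoLettersInEachLine_alt word
instance (word : String) (out : String) : Decidable (Spec_twoLettersInEachLine word out) := by unfold Spec_twoLettersInEachLine; infer_instance

-- ===== CLAIM (what is proved, stated in full; the proofs are below) =====
def Claim_equal_twoLettersInEachLine : Prop := ∀ (word : String), Dom_twoLettersInEachLine word → Spec_twoLettersInEachLine word (twoLettersInEachLine word)

-- ===== LEMMAS AND PROOFS =====

-- canonical form both ports are reduced to: newline after every complete pair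
def pairsRec : List Char → List Char
  | [] => []
  | [c] => [c]
  | c1 :: c2 :: rest => c1 :: c2 :: '\n' :: pairsRec rest

-- A's loop, as a recursion on the remaining characters carrying the counter
def procFrom : Int → List Char → List Char
  | _, [] => []
  | count, c :: rest =>
      (c :: (if PySem.Int.mod count 2 == 0 then ['\n'] else [])) ++ procFrom (count + 1) rest

lemma procFrom_congr (l : List Char) : ∀ (c c' : Int),
    PySem.Int.mod c 2 = PySem.Int.mod c' 2 → procFrom c l = procFrom c' l := by
  induction l with
  | nil => intro c c' _; rfl
  | cons x rest ih =>
    intro c c' h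
    simp only [procFrom, h]
    rw [ih (c + 1) (c' + 1)]
    rw [PySem.Int.mod_eq_emod_of_pos (by norm_num), PySem.Int.mod_eq_emod_of_pos (by norm_num)] at h ⊢
    omega

lemma procFrom_one_eq_pairsRec (l : List Char) : procFrom 1 l = pairsRec l := by
  induction l using pairsRec.induct with
  | case1 => rfl
  | case2 c => rfl
  | case3 c1 c2 rest ih =>
    show procFrom 1 (c1 :: c2 :: rest) = c1 :: c2 :: '\n' :: pairsRec rest
    simp only [procFrom]
    norm_num [PySem.Int.mod_eq_emod_of_pos (show (0:Int) < 2 by norm_num)]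
    rw [procFrom_congr rest 3 1 (by decide)]
    simpa using ih

lemma A_loop (cs : List Char) : ∀ (m k : Nat), cs.length - k = m → ∀ (count : Int) (acc : List Char),
    ((PySem.List.pyRange (k : Int) (cs.length : Int) 1).foldl (twoLettersInEachLine.body cs) (count, acc)).2
      = acc ++ procFrom count (cs.drop k) := by
  intro m
  induction m with
  | zero =>
    intro k hk count acc
    have hlen : cs.length ≤ k := by omega
    have : ¬ ((k : Int) < (cs.length : Int)) := by exact_mod_cast not_lt.mpr hlen
    rw [PySem.List.pyRange_of_pos _ _ (by norm_num : (0:Int) < 1), if_neg this]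
    simp [List.drop_eq_nil_of_le hlen, procFrom]
  | succ m ih =>
    intro k hk count acc
    have hk' : k < cs.length := by omega
    rw [PySem.List.pyRange_one_cons (by exact_mod_cast hk')]
    have hdrop : cs.drop k = cs[k] :: cs.drop (k + 1) := (List.getElem_cons_drop hk').symm
    have hget : PySem.List.pyGetD cs (k : Int) ' ' = cs[k] := by
      simp [PySem.List.pyGetD_natCast, List.getD_eq_getElem?_getD, hk']
    simp only [List.foldl_cons, twoLettersInEachLine.body, hget]
    have : ((k : Int) + 1) = ((k + 1 : Nat) : Int) := by push_cast; ring
    rw [this, ih (k + 1) (by omega)]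
    rw [hdrop]
    simp only [procFrom]
    split_ifs <;> simp

lemma pyRange_two_cons {a b : Int} (h : a < b) :
    PySem.List.pyRange a b 2 = a :: PySem.List.pyRange (a + 2) b 2 := by
  rw [PySem.List.pyRange_of_pos a b (by norm_num : (0:Int) < 2),
      PySem.List.pyRange_of_pos (a + 2) b (by norm_num : (0:Int) < 2)]
  have h1 : ((b - a + 2 - 1) / 2).toNat = ((b - (a + 2) + 2 - 1) / 2).toNat + 1 := by omega
  rw [if_pos h, h1]
  by_cases h2 : a + 2 < b
  · rw [if_pos h2, List.range_succ_eq_map, List.map_cons, List.map_map]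
    simp only [Nat.cast_zero, mul_zero, add_zero, List.cons.injEq, true_and]
    apply List.map_congr_left
    intro k _
    simp only [Function.comp_apply]
    push_cast
    ring
  · rw [if_neg h2]
    have : ((b - (a + 2) + 2 - 1) / 2).toNat = 0 := by omega
    rw [this]
    simp

lemma B_loop (cs : List Char) : ∀ (m k : Nat), cs.length - k = m →
    (((PySem.List.pyRange (k : Int) (cs.length : Int) 2).map (twoLettersInEachLine_alt.chunk cs)).flatten)
      = pairsRec (cs.drop k) := by
  intro m
  induction m using Nat.strong_induction_on with
  | _ m ih =>
    intro k hk
    by_cases hlt : k < cs.length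
    · rw [pyRange_two_cons (by exact_mod_cast hlt)]
      have hch : twoLettersInEachLine_alt.chunk cs (k : Int)
          = (let c := (cs.drop k).take 2; if c.length == 2 then c ++ ['\n'] else c) := by
        simp only [twoLettersInEachLine_alt.chunk]
        have : ((k : Int) + 2) = ((k : Int) + ((2 : Nat) : Int)) := by push_cast; ring
        rw [this, PySem.List.slice_natCast_add]
      have hstep : ((k : Int) + 2) = ((k + 2 : Nat) : Int) := by push_cast; ring
      rcases hd : cs.drop k with _ | ⟨c1, rest1⟩
      · exact absurd (List.drop_eq_nil_iff.mp hd) (by omega)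
      rcases rest1 with _ | ⟨c2, rest⟩
      · -- one trailing character
        have hlen1 : cs.length = k + 1 := by
          have := congrArg List.length hd; simp at this; omega
        have hemp : ¬ ((k + 2 : Nat) : Int) < (cs.length : Int) := by exact_mod_cast by omega
        rw [List.map_cons, List.flatten_cons, hch, hstep,
            PySem.List.pyRange_of_pos _ _ (by norm_num : (0:Int) < 2), if_neg hemp]
        simp [hd, pairsRec]
      · -- a complete pair
        have hdrop2 : cs.drop (k + 2) = rest := by
          simpa [List.drop_drop, Nat.add_comm] using congrArg (List.drop 2) hd
        have hlen2 : k + 2 ≤ cs.length := by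
          have := congrArg List.length hd; simp at this; omega
        rw [List.map_cons, List.flatten_cons, hch, hstep,
            ih (cs.length - (k + 2)) (by omega) (k + 2) rfl]
        simp [hd, hdrop2, pairsRec]
    · have : ¬ ((k : Int) < (cs.length : Int)) := by exact_mod_cast hlt
      rw [PySem.List.pyRange_of_pos _ _ (by norm_num : (0:Int) < 2), if_neg this]
      simp [List.drop_eq_nil_of_le (by omega : cs.length ≤ k), pairsRec]

-- ===== VERDICT (by name: the statement is the Claim_ definition above) =====
theorem twoLettersInEachLine_spec : Claim_equal_twoLettersInEachLine := by
  intro word _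
  show twoLettersInEachLine word = twoLettersInEachLine_alt word
  unfold twoLettersInEachLine twoLettersInEachLine_alt
  rw [PySem.Str.len_eq]
  have hA := A_loop word.toList (word.toList.length) 0 (by omega) 1 []
  have hB := B_loop word.toList (word.toList.length) 0 (by omega)
  simp only [Nat.cast_zero] at hA hB
  rw [hA, hB, List.drop_zero, List.nil_append, procFrom_one_eq_pairsRec]
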